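-- pv_equiv track=rewrite | github.com/yunmuxize/Dryad_V2 | src/predictors/entries_calculator.py | aggregate_path_conditions
-- ===== SOURCE A (Python) =====
-- FEATURE_BITS = {
--     'Total length': 16,
--     'Protocol': 8,
--     'IPV4 Flags (DF)': 1,
--     'Time to live': 8,
--     'Src Port': 16,
--     'Dst Port': 16,
--     'TCP flags (Reset)': 1,
--     'TCP flags (Syn)': 1
-- }
--
-- FEATURE_ORDER = [
--     'Total length',
--     'Protocol',
--     'IPV4 Flags (DF)',
--     'Time to live',
--     'Src Port',
--     'Dst Port',
--     'TCP flags (Reset)',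
--     'TCP flags (Syn)'
-- ]
--
-- def aggregate_path_conditions(path_conditions):
--     """聚合路径条件，计算每个特征的范围"""
--     feature_ranges = {f: (0, (1 << FEATURE_BITS[f]) - 1) for f in FEATURE_ORDER}
--
--     for feature, operator, threshold in path_conditions:
--         if feature not in feature_ranges:
--             continue
--
--         threshold_int = int(threshold)
--         current_min, current_max = feature_ranges[feature]
--
--         if operator == '<=':
--             new_max = min(current_max, threshold_int)
--             feature_ranges[feature] = (current_min, new_max)
--         elif operator == '>':
--             new_min = max(current_min, threshold_int + 1)
--             feature_ranges[feature] = (new_min, current_max)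
--
--     return feature_ranges
-- ===== SOURCE B (Python) =====
-- FEATURE_BITS = {
--     'Total length': 16,
--     'Protocol': 8,
--     'IPV4 Flags (DF)': 1,
--     'Time to live': 8,
--     'Src Port': 16,
--     'Dst Port': 16,
--     'TCP flags (Reset)': 1,
--     'TCP flags (Syn)': 1
-- }
--
-- FEATURE_ORDER = [
--     'Total length',
--     'Protocol',
--     'IPV4 Flags (DF)',
--     'Time to live',
--     'Src Port',
--     'Dst Port',
--     'TCP flags (Reset)',
--     'TCP flags (Syn)'
-- ]
--
-- def aggregate_path_conditions(path_conditions):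
--     """Group conditions by feature, then build each range in one comprehension."""
--     groups = {}
--     for feature, operator, threshold in path_conditions:
--         if feature in FEATURE_BITS:
--             groups.setdefault(feature, []).append((operator, int(threshold)))
--     return {
--         f: (max([0] + [t + 1 for op, t in groups.get(f, []) if op == '>']),
--             min([(1 << FEATURE_BITS[f]) - 1] + [t for op, t in groups.get(f, []) if op == '<=']))
--         for f in FEATURE_ORDER
--     }
-- ===== Notes on version B (the rewrite author's own statement) =====
-- stated objective: alternative
-- what changed: Replaced the single in-place pass that mutates a ranges dict per condition by a group-by pass (conditions bucketed per feature) followed by a comprehension that computes each range as max/min over the bucket's thresholds.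
import Mathlib
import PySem

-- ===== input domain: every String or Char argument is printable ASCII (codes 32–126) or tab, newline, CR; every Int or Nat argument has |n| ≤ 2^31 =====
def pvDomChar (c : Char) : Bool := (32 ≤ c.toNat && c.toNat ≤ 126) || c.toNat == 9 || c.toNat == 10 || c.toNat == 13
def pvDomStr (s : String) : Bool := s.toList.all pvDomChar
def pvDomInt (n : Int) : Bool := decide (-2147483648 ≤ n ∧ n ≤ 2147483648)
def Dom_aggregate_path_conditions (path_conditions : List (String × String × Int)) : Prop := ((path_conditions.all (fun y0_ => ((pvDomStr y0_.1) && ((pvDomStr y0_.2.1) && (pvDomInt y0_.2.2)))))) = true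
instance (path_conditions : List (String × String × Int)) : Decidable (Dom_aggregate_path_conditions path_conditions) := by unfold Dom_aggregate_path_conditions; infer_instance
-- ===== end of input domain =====

-- B replaces A's in-place range-mutating pass by a group-by pass plus a per-feature
-- min/max aggregation (alternative decomposition, same cost); return values are equal.

-- ===== PORT A =====
-- module constant FEATURE_BITS (dict str -> int)
def FEATURE_BITS : PySem.Dict String Int := PySem.Dict.ofList
  [("Total length", 16), ("Protocol", 8), ("IPV4 Flags (DF)", 1), ("Time to live", 8),
   ("Src Port", 16), ("Dst Port", 16), ("TCP flags (Reset)", 1), ("TCP flags (Syn)", 1)]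

-- module constant FEATURE_ORDER
def FEATURE_ORDER : List String :=
  ["Total length", "Protocol", "IPV4 Flags (DF)", "Time to live",
   "Src Port", "Dst Port", "TCP flags (Reset)", "TCP flags (Syn)"]

-- (1 << FEATURE_BITS[f]) - 1; the getD default 0 is never hit (every f used is a key of FEATURE_BITS)
def apcDefaultMax (f : String) : Int := (1 <<< (FEATURE_BITS.getD f 0).toNat) - 1

-- the initial dict comprehension {f: (0, (1 << FEATURE_BITS[f]) - 1) for f in FEATURE_ORDER}
def apcInit : PySem.Dict String (Int × Int) :=
  FEATURE_ORDER.foldl (fun d f => d.insert f (0, apcDefaultMax f)) PySem.Dict.empty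

-- one iteration of A's loop body (int(threshold) on an int is the identity;
-- the getD default (0,0) is never hit: the branch runs only when the key is present)
def apcStep (d : PySem.Dict String (Int × Int)) (c : String × String × Int) :
    PySem.Dict String (Int × Int) :=
  if d.contains c.1 then
    let r := d.getD c.1 (0, 0)
    if c.2.1 == "<=" then d.insert c.1 (r.1, min r.2 c.2.2)
    else if c.2.1 == ">" then d.insert c.1 (max r.1 (c.2.2 + 1), r.2)
    else d
  else d

def aggregate_path_conditions (path_conditions : List (String × String × Int)) :
    List (String × Int × Int) :=
  (path_conditions.foldl apcStep apcInit).items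

-- ===== PORT B =====
-- groups.setdefault(feature, []).append((operator, int(threshold))) for in-range features
def apcGroups (path_conditions : List (String × String × Int)) :
    PySem.Dict String (List (String × Int)) :=
  path_conditions.foldl
    (fun g c => if FEATURE_BITS.contains c.1 then g.modify c.1 [] (· ++ [c.2]) else g)
    PySem.Dict.empty

def aggregate_path_conditions_alt (path_conditions : List (String × String × Int)) :
    List (String × Int × Int) :=
  let groups := apcGroups path_conditions
  FEATURE_ORDER.map (fun f =>
    let grp := groups.getD f []
    (f, ((grp.filter (fun p => p.1 == ">")).map (fun p => p.2 + 1)).foldl max 0,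
        ((grp.filter (fun p => p.1 == "<=")).map (fun p => p.2)).foldl min (apcDefaultMax f)))

-- ===== PRECONDITION & SPEC =====
def Spec_aggregate_path_conditions (path_conditions : List (String × String × Int)) (out : List (String × Int × Int)) : Prop := out = aggregate_path_conditions_alt path_conditions
instance (path_conditions : List (String × String × Int)) (out : List (String × Int × Int)) : Decidable (Spec_aggregate_path_conditions path_conditions out) := by unfold Spec_aggregate_path_conditions; infer_instance

-- ===== CLAIM (what is proved, stated in full; the proofs are below) =====
def Claim_equal_aggregate_path_conditions : Prop := ∀ (path_conditions : List (String × String × Int)), Dom_aggregate_path_conditions path_conditions → Spec_aggregate_path_conditions path_conditions (aggregate_path_conditions path_conditions)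

-- ===== LEMMAS AND PROOFS =====

-- the per-feature update A performs on a range, as a function of (operator, threshold)
def apcUpd (r : Int × Int) (p : String × Int) : Int × Int :=
  if p.1 == "<=" then (r.1, min r.2 p.2)
  else if p.1 == ">" then (max r.1 (p.2 + 1), r.2)
  else r

lemma feature_order_nodup : FEATURE_ORDER.Nodup := by decide

lemma mem_order_contains_bits {f : String} (h : f ∈ FEATURE_ORDER) :
    FEATURE_BITS.contains f = true := by
  fin_cases h <;> decide

lemma apcInit_items :
    apcInit.items = FEATURE_ORDER.map (fun f => (f, ((0 : Int), apcDefaultMax f))) := by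
  decide

-- A's loop, characterized: starting from any dict whose items are FEATURE_ORDER keyed
-- with values v, the fold ends with each feature's value folded through its own conditions.
lemma foldl_apcStep_items (pcs : List (String × String × Int)) :
    ∀ (v : String → Int × Int) (d : PySem.Dict String (Int × Int)),
      d.items = FEATURE_ORDER.map (fun f => (f, v f)) →
      (pcs.foldl apcStep d).items =
        FEATURE_ORDER.map (fun f =>
          (f, ((pcs.filter (fun c => c.1 == f)).map (fun c => c.2)).foldl apcUpd (v f))) := by
  induction pcs with
  | nil =>
      intro v d hd
      simpa using hd
  | cons c pcs ih =>
      intro v d hd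
      have hkeys : d.keys = FEATURE_ORDER := by
        simp only [PySem.Dict.keys, hd, List.map_map]; rfl
      have hnd : d.keys.Nodup := by rw [hkeys]; exact feature_order_nodup
      have hcont : d.contains c.1 = decide (c.1 ∈ FEATURE_ORDER) := by
        rw [PySem.Dict.contains_eq_decide_mem_keys, hkeys]
      -- the value at a key of the dict
      have hget : ∀ f, f ∈ FEATURE_ORDER → d.getD f (0, 0) = v f := by
        intro f hf
        have : (f, v f) ∈ d.items := by
          rw [hd]; exact List.mem_map_of_mem hf
        exact PySem.Dict.getD_of_mem_items d this hnd (0, 0)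
      by_cases hmem : c.1 ∈ FEATURE_ORDER
      · -- the key is present; A updates it in place
        have hc : d.contains c.1 = true := by simp [hcont, hmem]
        have hins : ∀ w : Int × Int,
            (d.insert c.1 w).items =
              FEATURE_ORDER.map (fun f => (f, if f = c.1 then w else v f)) := by
          intro w
          rw [PySem.Dict.items_insert_of_contains d w hc, hd, List.map_map]
          apply List.map_congr_left
          intro f _
          by_cases hfc : f = c.1 <;> simp [hfc]
        -- step the invariant with the updated value function
        have hstep : (apcStep d c).items =
            FEATURE_ORDER.map (fun f => (f, if f = c.1 then apcUpd (v c.1) c.2 else v f)) := by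
          unfold apcStep
          rw [hc, if_pos rfl, hget c.1 hmem]
          by_cases h1 : (c.2.1 == "<=") = true
          · rw [if_pos h1]
            have hval : apcUpd (v c.1) c.2 = ((v c.1).1, min (v c.1).2 c.2.2) := by
              simp [apcUpd, h1]
            rw [hval]; exact hins _
          · rw [if_neg h1]
            by_cases h2 : (c.2.1 == ">") = true
            · rw [if_pos h2]
              have hval : apcUpd (v c.1) c.2 = (max (v c.1).1 (c.2.2 + 1), (v c.1).2) := by
                simp [apcUpd, h1, h2]
              rw [hval]; exact hins _
            · rw [if_neg h2]
              have hval : apcUpd (v c.1) c.2 = v c.1 := by simp [apcUpd, h1, h2]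
              rw [hval, hd]
              apply List.map_congr_left
              intro f _
              by_cases hfc : f = c.1 <;> simp [hfc]
        rw [List.foldl_cons,
            ih (fun f => if f = c.1 then apcUpd (v c.1) c.2 else v f) _ hstep]
        apply List.map_congr_left
        intro f _
        by_cases hfc : c.1 = f
        · subst hfc; simp [apcUpd]
        · have : (c.1 == f) = false := by simp [hfc]
          simp [this, Ne.symm hfc]
      · -- the key is absent; A skips the condition
        have hc : d.contains c.1 = false := by simp [hcont, hmem]
        have hstep : apcStep d c = d := by unfold apcStep; rw [hc]; simp
        rw [List.foldl_cons, hstep, ih v d hd]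
        apply List.map_congr_left
        intro f hf
        have : (c.1 == f) = false := by
          simp only [beq_eq_false_iff_ne, ne_eq]
          intro hcf; exact hmem (hcf ▸ hf)
        simp [this]
  termination_by pcs.length

-- B's group-by, characterized: each feature's bucket is exactly its conditions' (op, t) pairs
lemma apcGroups_getD (pcs : List (String × String × Int)) :
    ∀ (g : PySem.Dict String (List (String × Int))) (f : String),
      FEATURE_BITS.contains f = true →
      (pcs.foldl
        (fun g c => if FEATURE_BITS.contains c.1 then g.modify c.1 [] (· ++ [c.2]) else g)
        g).getD f [] =
      g.getD f [] ++ (pcs.filter (fun c => c.1 == f)).map (fun c => c.2) := by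
  induction pcs with
  | nil => intro g f _; simp
  | cons c pcs ih =>
      intro g f hf
      rw [List.foldl_cons]
      by_cases hc : FEATURE_BITS.contains c.1 = true
      · rw [if_pos hc]
        rw [ih _ f hf]
        by_cases hcf : c.1 = f
        · subst hcf
          rw [PySem.Dict.getD_modify_self]
          simp
        · have h1 : f ≠ c.1 := Ne.symm hcf
          have h2 : (c.1 == f) = false := by simp [hcf]
          rw [PySem.Dict.getD_modify_of_ne _ _ _ h1]
          simp [h2]
      · have hne : (c.1 == f) = false := by
          simp only [beq_eq_false_iff_ne, ne_eq]
          intro h; exact hc (h ▸ hf)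
        rw [if_neg hc]
        rw [ih g f hf]
        simp [hne]

-- folding A's per-condition update = the pair of B's max/min aggregations
lemma foldl_apcUpd_eq (grp : List (String × Int)) :
    ∀ (a b : Int),
      grp.foldl apcUpd (a, b) =
        (((grp.filter (fun p => p.1 == ">")).map (fun p => p.2 + 1)).foldl max a,
         ((grp.filter (fun p => p.1 == "<=")).map (fun p => p.2)).foldl min b) := by
  induction grp with
  | nil => intro a b; simp
  | cons p grp ih =>
      intro a b
      rw [List.foldl_cons]
      by_cases h1 : p.1 == "<="
      · have h2 : (p.1 == ">") = false := by
          rcases eq_of_beq h1 with h; simp [h]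
        have hupd : apcUpd (a, b) p = (a, min b p.2) := by simp [apcUpd, h1]
        rw [hupd, ih]
        simp [h1, h2]
      · by_cases h2 : p.1 == ">"
        · have hupd : apcUpd (a, b) p = (max a (p.2 + 1), b) := by simp [apcUpd, h1, h2]
          rw [hupd, ih]
          simp [h1, h2]
        · have hupd : apcUpd (a, b) p = (a, b) := by simp [apcUpd, h1, h2]
          rw [hupd, ih]
          simp [h1, h2]

-- ===== VERDICT (by name: the statement is the Claim_ definition above) =====
theorem aggregate_path_conditions_spec : Claim_equal_aggregate_path_conditions := by
  intro pcs _
  unfold Spec_aggregate_path_conditions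
  unfold aggregate_path_conditions aggregate_path_conditions_alt
  rw [foldl_apcStep_items pcs (fun f => ((0 : Int), apcDefaultMax f)) apcInit apcInit_items]
  apply List.map_congr_left
  intro f hf
  have hbits : FEATURE_BITS.contains f = true := mem_order_contains_bits hf
  unfold apcGroups
  rw [apcGroups_getD pcs PySem.Dict.empty f hbits]
  rw [PySem.Dict.getD_empty, List.nil_append]
  rw [foldl_apcUpd_eq]
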